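-- pv_equiv track=rewrite | github.com/tomokio/atcoder | python/algorithm/dfs.py | dfs
-- ===== SOURCE A (Python) =====
-- def dfs(v, g, seen, ans):
--     seen.add(v)
--     ans = max(ans, v + 1)
--
--     for cv in g[v]:
--         if cv in seen:
--             continue
--         else:
--             ans = dfs(cv, g, seen, ans)
--
--     return ans
-- ===== SOURCE B (Python) =====
-- def dfs(v, g, seen, ans):
--     seen.add(v)
--     ans = max(ans, v + 1)
--     stack = list(reversed(g[v]))
--     while stack:
--         cv = stack.pop()
--         if cv in seen:
--             continue
--         seen.add(cv)
--         ans = max(ans, cv + 1)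
--         stack.extend(reversed(g[cv]))
--     return ans
-- ===== Notes on version B (the rewrite author's own statement) =====
-- stated objective: alternative
-- what changed: Replaces the recursive DFS (implicit call stack, inner for-loop per vertex) by a single iterative loop over an explicit list stack with a mark-on-pop guard, which also avoids Python's recursion-depth limit on deep graphs.
import Mathlib
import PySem

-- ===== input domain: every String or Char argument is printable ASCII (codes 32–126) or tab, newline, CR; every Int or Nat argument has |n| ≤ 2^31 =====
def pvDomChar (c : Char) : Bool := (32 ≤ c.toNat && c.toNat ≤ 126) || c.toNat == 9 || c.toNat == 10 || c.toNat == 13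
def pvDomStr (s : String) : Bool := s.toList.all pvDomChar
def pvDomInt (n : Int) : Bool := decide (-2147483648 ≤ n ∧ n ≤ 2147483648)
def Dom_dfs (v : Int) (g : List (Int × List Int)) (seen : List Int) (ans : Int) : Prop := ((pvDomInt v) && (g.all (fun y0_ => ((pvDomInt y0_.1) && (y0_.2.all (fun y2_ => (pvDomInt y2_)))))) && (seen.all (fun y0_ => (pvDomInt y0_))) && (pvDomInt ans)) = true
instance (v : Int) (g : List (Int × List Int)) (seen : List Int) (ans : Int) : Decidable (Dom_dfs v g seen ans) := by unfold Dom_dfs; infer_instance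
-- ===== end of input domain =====

-- B replaces A's recursive DFS by an iterative explicit-stack DFS with a mark-on-pop guard (objective:
-- alternative, not faster). Both Pythons mutate `seen` identically (same visit order); the theorems are
-- about the return value.

-- ===== PORT A =====
-- g[u]: Python raises KeyError when u is not a key (excluded by Pre_dfs); on such u the port reads [].
def pvNbrs (g : List (Int × List Int)) (u : Int) : List Int :=
  (PySem.Dict.get? (PySem.Dict.mk g) u).getD []

-- every vertex named in g (keys and neighbours); only used to size the fuel
def pvVerts (g : List (Int × List Int)) : List Int :=
  g.flatMap (fun p => p.1 :: p.2)

-- fuel: one unit per recursive `dfs` call; `none` = fuel exhausted, proved unreachable at pvFuelA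
def pvFuelA (g : List (Int × List Int)) : Nat := (pvVerts g).length + 2

mutual
def dfsA (fuel : Nat) (v : Int) (g : List (Int × List Int)) (seen : PySem.Set Int) (ans : Int) :
    Option (PySem.Set Int × Int) :=
  match fuel with
  | 0 => none
  | f + 1 => dfsALoop f (pvNbrs g v) g (PySem.Set.add seen v) (max ans (v + 1))
termination_by (fuel, 0)

def dfsALoop (fuel : Nat) (l : List Int) (g : List (Int × List Int)) (seen : PySem.Set Int) (ans : Int) :
    Option (PySem.Set Int × Int) :=
  match l with
  | [] => some (seen, ans)
  | cv :: rest =>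
    if PySem.Set.contains seen cv then
      dfsALoop fuel rest g seen ans
    else
      match dfsA fuel cv g seen ans with
      | none => none
      | some (s, a) => dfsALoop fuel rest g s a
termination_by (fuel, l.length)
end

def dfs (v : Int) (g : List (Int × List Int)) (seen : List Int) (ans : Int) : Int :=
  ((dfsA (pvFuelA g) v g seen ans).getD (seen, ans)).2

-- ===== PORT B =====
-- fuel: one unit per while-iteration; `none` = fuel exhausted, proved unreachable at pvFuelB
def pvFuelB (g : List (Int × List Int)) : Nat := ((pvVerts g).length + 1) * ((pvVerts g).length + 1)

def dfsBLoop (fuel : Nat) (stack : List Int) (g : List (Int × List Int)) (seen : PySem.Set Int) (ans : Int) :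
    Option (PySem.Set Int × Int) :=
  if stack.isEmpty then some (seen, ans)
  else
    match fuel with
    | 0 => none
    | f + 1 =>
      match PySem.List.pop? stack with
      | none => none
      | some (cv, rest) =>
        if PySem.Set.contains seen cv then
          dfsBLoop f rest g seen ans
        else
          dfsBLoop f (rest ++ (pvNbrs g cv).reverse) g (PySem.Set.add seen cv) (max ans (cv + 1))

def dfs_alt (v : Int) (g : List (Int × List Int)) (seen : List Int) (ans : Int) : Int :=
  ((dfsBLoop (pvFuelB g) (pvNbrs g v).reverse g (PySem.Set.add seen v) (max ans (v + 1))).getD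
    (PySem.Set.add seen v, max ans (v + 1))).2

-- ===== PRECONDITION & SPEC =====
-- adjacency entry of u in g (first match), [] when u has none: used only to state Pre_dfs
def pvAdj (g : List (Int × List Int)) (u : Int) : List Int :=
  ((g.find? (fun p => p.1 == u)).map Prod.snd).getD []

-- vertices reachable from R along adjacency edges that do not enter `seen` (n iterations suffice
-- for the fixpoint once n exceeds the number of vertices named in g)
def pvReach (g : List (Int × List Int)) (seen : List Int) : Nat → PySem.Set Int → PySem.Set Int
  | 0, R => R
  | n + 1, R =>
    pvReach g seen n
      (PySem.Set.update R ((R.flatMap (fun u => pvAdj g u)).filter (fun c => decide (c ∉ seen))))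

-- Pre_dfs: every vertex the traversal can reach (v, then neighbours not blocked by seen) has an
-- adjacency entry in g — exactly the inputs on which no g[u] lookup raises KeyError, so A returns.
def Pre_dfs (v : Int) (g : List (Int × List Int)) (seen : List Int) (ans : Int) : Prop :=
  ∀ u ∈ pvReach g seen ((g.flatMap (fun p => p.1 :: p.2)).length + 1) [v], u ∈ g.map Prod.fst
instance (v : Int) (g : List (Int × List Int)) (seen : List Int) (ans : Int) : Decidable (Pre_dfs v g seen ans) := by unfold Pre_dfs; infer_instance

def pvWitness_dfs : Int × (List (Int × List Int)) × List Int × Int := (0, [(0, [1]), (1, [0])], [], 0)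

def Spec_dfs (v : Int) (g : List (Int × List Int)) (seen : List Int) (ans : Int) (out : Int) : Prop := out = dfs_alt v g seen ans
instance (v : Int) (g : List (Int × List Int)) (seen : List Int) (ans : Int) (out : Int) : Decidable (Spec_dfs v g seen ans out) := by unfold Spec_dfs; infer_instance

-- ===== CLAIM (what is proved, stated in full; the proofs are below) =====
def Claim_equal_dfs : Prop := ∀ (v : Int) (g : List (Int × List Int)) (seen : List Int) (ans : Int), Dom_dfs v g seen ans → Pre_dfs v g seen ans → Spec_dfs v g seen ans (dfs v g seen ans)

-- ===== LEMMAS AND PROOFS =====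

-- number of vertices of g not yet seen: the termination measure of both traversals
def pvCnt (g : List (Int × List Int)) (seen : PySem.Set Int) : Nat :=
  (pvVerts g).countP (fun x => decide (x ∉ seen))

theorem pvNbrs_cons (p : Int × List Int) (g' : List (Int × List Int)) (u : Int) :
    pvNbrs (p :: g') u = if p.1 == u then p.2 else pvNbrs g' u := by
  obtain ⟨k, vs⟩ := p
  simp only [pvNbrs, PySem.Dict.get?_mk_cons]
  split <;> rfl

theorem mem_pvNbrs (g : List (Int × List Int)) (u x : Int) (h : x ∈ pvNbrs g u) : x ∈ pvVerts g := by
  induction g with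
  | nil => simp [pvNbrs, PySem.Dict.get?] at h
  | cons p g' ih =>
    rw [pvNbrs_cons] at h
    simp only [pvVerts, List.flatMap_cons, List.mem_append, List.mem_cons]
    by_cases hk : (p.1 == u) = true
    · simp [hk] at h; tauto
    · simp [hk] at h; right; exact ih h

theorem len_pvNbrs (g : List (Int × List Int)) (u : Int) :
    (pvNbrs g u).length ≤ (pvVerts g).length := by
  induction g with
  | nil => simp [pvNbrs, PySem.Dict.get?, pvVerts]
  | cons p g' ih =>
    rw [pvNbrs_cons]
    simp only [pvVerts, List.flatMap_cons, List.length_append, List.length_cons] at ih ⊢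
    split <;> omega

theorem pvCnt_strict {U : List Int} {p q : Int → Bool} (hmono : ∀ x ∈ U, q x = true → p x = true)
    {a : Int} (ha : a ∈ U) (hpa : p a = true) (hqa : q a = false) :
    U.countP q < U.countP p := by
  obtain ⟨l1, l2, rfl⟩ := List.append_of_mem ha
  have h1 : l1.countP q ≤ l1.countP p :=
    List.countP_mono_left (fun x hx => hmono x (by simp [hx]))
  have h2 : l2.countP q ≤ l2.countP p :=
    List.countP_mono_left (fun x hx => hmono x (by simp [hx]))
  simp [List.countP_append, hpa, hqa]
  omega

theorem pvCnt_lt (g : List (Int × List Int)) (seen : PySem.Set Int) {a : Int}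
    (haU : a ∈ pvVerts g) (haS : a ∉ seen) :
    pvCnt g (PySem.Set.add seen a) < pvCnt g seen := by
  refine pvCnt_strict (fun x _ hx => ?_) haU ?_ ?_
  · simp only [decide_eq_true_eq, PySem.Set.mem_add] at hx ⊢
    tauto
  · simp [haS]
  · simp [PySem.Set.mem_add]

theorem pvCnt_mono (g : List (Int × List Int)) {seen s' : PySem.Set Int}
    (h : ∀ x ∈ seen, x ∈ s') : pvCnt g s' ≤ pvCnt g seen := by
  refine List.countP_mono_left (fun x _ hx => ?_)
  simp only [decide_eq_true_eq] at hx ⊢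
  exact fun hm => hx (h x hm)

theorem pvCnt_le_len (g : List (Int × List Int)) (seen : PySem.Set Int) :
    pvCnt g seen ≤ (pvVerts g).length := List.countP_le_length

theorem pvCnt_pos (g : List (Int × List Int)) (seen : PySem.Set Int) {a : Int}
    (haU : a ∈ pvVerts g) (haS : a ∉ seen) : 0 < pvCnt g seen := by
  rw [pvCnt, List.countP_pos_iff]
  exact ⟨a, haU, by simp [haS]⟩

-- unfolding equations of B's loop (stack top = last element)
theorem dfsBLoop_nil (f : Nat) (g : List (Int × List Int)) (seen : PySem.Set Int) (ans : Int) :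
    dfsBLoop f [] g seen ans = some (seen, ans) := by
  rw [dfsBLoop.eq_def]; simp

theorem dfsBLoop_zero (st : List Int) (hst : st ≠ []) (g : List (Int × List Int)) (seen : PySem.Set Int) (ans : Int) :
    dfsBLoop 0 st g seen ans = none := by
  rw [dfsBLoop.eq_def]; simp [hst]

theorem dfsBLoop_concat (f : Nat) (rest : List Int) (cv : Int) (g : List (Int × List Int)) (seen : PySem.Set Int) (ans : Int) :
    dfsBLoop (f + 1) (rest ++ [cv]) g seen ans =
      if PySem.Set.contains seen cv then dfsBLoop f rest g seen ans
      else dfsBLoop f (rest ++ (pvNbrs g cv).reverse) g (PySem.Set.add seen cv) (max ans (cv + 1)) := by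
  rw [dfsBLoop.eq_def]
  rw [if_neg (by simp)]
  rw [PySem.List.pop?_last]

theorem contains_eq_false_of_not_mem {seen : PySem.Set Int} {cv : Int} (hc : cv ∉ seen) :
    PySem.Set.contains seen cv = false := by
  rw [Bool.eq_false_iff]
  exact fun hh => hc ((PySem.Set.contains_iff seen cv).1 hh)

-- A's fuel is sufficient, and A only grows `seen`
theorem suffLoop (g : List (Int × List Int)) (f : Nat)
    (hA : ∀ (v : Int) (seen : PySem.Set Int) (ans : Int), v ∈ pvVerts g → v ∉ seen → pvCnt g seen ≤ f →
      ∃ r, dfsA f v g seen ans = some r ∧ ∀ x ∈ seen, x ∈ r.1) :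
    ∀ (l : List Int), (∀ x ∈ l, x ∈ pvVerts g) → ∀ (seen : PySem.Set Int) (ans : Int), pvCnt g seen ≤ f →
      ∃ r, dfsALoop f l g seen ans = some r ∧ ∀ x ∈ seen, x ∈ r.1 := by
  intro l
  induction l with
  | nil => intro _ seen ans _; exact ⟨(seen, ans), by rw [dfsALoop], fun x hx => hx⟩
  | cons cv rest ih =>
    intro hsub seen ans hf
    rw [dfsALoop]
    by_cases hc : cv ∈ seen
    · rw [if_pos ((PySem.Set.contains_iff seen cv).2 hc)]
      exact ih (fun x hx => hsub x (List.mem_cons_of_mem _ hx)) seen ans hf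
    · rw [if_neg (by rw [Bool.not_eq_true]; exact contains_eq_false_of_not_mem hc)]
      obtain ⟨r1, hr1, hm1⟩ := hA cv seen ans (hsub cv List.mem_cons_self) hc hf
      rw [hr1]
      obtain ⟨r2, hr2, hm2⟩ := ih (fun x hx => hsub x (List.mem_cons_of_mem _ hx)) r1.1 r1.2
        (le_trans (pvCnt_mono g hm1) hf)
      exact ⟨r2, by rw [← hr2], fun x hx => hm2 x (hm1 x hx)⟩

theorem suffA (g : List (Int × List Int)) :
    ∀ (f : Nat) (v : Int) (seen : PySem.Set Int) (ans : Int), v ∈ pvVerts g → v ∉ seen → pvCnt g seen ≤ f →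
      ∃ r, dfsA f v g seen ans = some r ∧ ∀ x ∈ seen, x ∈ r.1 := by
  intro f
  induction f with
  | zero => intro v seen ans hU hS hf; exact absurd hf (by have := pvCnt_pos g seen hU hS; omega)
  | succ f ihf =>
    intro v seen ans hU hS hf
    rw [dfsA]
    obtain ⟨r, hr, hm⟩ := suffLoop g f ihf (pvNbrs g v) (fun x hx => mem_pvNbrs g v x hx)
      (PySem.Set.add seen v) (max ans (v + 1)) (by have := pvCnt_lt g seen hU hS; omega)
    exact ⟨r, hr, fun x hx => hm x (by rw [PySem.Set.mem_add]; left; exact hx)⟩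

-- B's fuel is sufficient
theorem suffB (g : List (Int × List Int)) :
    ∀ (f : Nat) (st : List Int) (seen : PySem.Set Int) (ans : Int), (∀ x ∈ st, x ∈ pvVerts g) →
      st.length + ((pvVerts g).length + 1) * pvCnt g seen ≤ f →
      ∃ r, dfsBLoop f st g seen ans = some r := by
  intro f
  induction f with
  | zero =>
    intro st seen ans hsub hf
    rcases st with _ | ⟨x, xs⟩
    · exact ⟨(seen, ans), dfsBLoop_nil 0 g seen ans⟩
    · exact absurd hf (by simp)
  | succ f ihf =>
    intro st seen ans hsub hf
    rcases List.eq_nil_or_concat st with rfl | ⟨rest, cv, rfl⟩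
    · exact ⟨(seen, ans), dfsBLoop_nil _ g seen ans⟩
    rw [List.concat_eq_append] at hsub hf ⊢
    rw [dfsBLoop_concat]
    have hlen : (rest ++ [cv]).length = rest.length + 1 := by simp
    by_cases hc : cv ∈ seen
    · rw [if_pos ((PySem.Set.contains_iff seen cv).2 hc)]
      exact ihf rest seen ans (fun x hx => hsub x (by simp [hx])) (by omega)
    · rw [if_neg (by rw [Bool.not_eq_true]; exact contains_eq_false_of_not_mem hc)]
      have hcvU : cv ∈ pvVerts g := hsub cv (by simp)
      have h1 := pvCnt_lt g seen hcvU hc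
      have h2 := len_pvNbrs g cv
      refine ihf _ _ _ (fun x hx => ?_) ?_
      · rcases List.mem_append.1 hx with hx | hx
        · exact hsub x (by simp [hx])
        · exact mem_pvNbrs g cv x (List.mem_reverse.1 hx)
      · simp only [List.length_append, List.length_reverse]
        have h3 : pvCnt g seen ≤ (pvVerts g).length + 1 :=
          le_trans (pvCnt_le_len g seen) (by omega)
        nlinarith [hf, hlen]

-- big-step relation of B's while-loop (stack top = last element)
inductive BStep (g : List (Int × List Int)) : List Int → PySem.Set Int → Int → PySem.Set Int × Int → Prop
  | nil (seen : PySem.Set Int) (ans : Int) : BStep g [] seen ans (seen, ans)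
  | skip {rest : List Int} {cv : Int} {seen : PySem.Set Int} {ans : Int} {r : PySem.Set Int × Int}
      (h : cv ∈ seen) : BStep g rest seen ans r → BStep g (rest ++ [cv]) seen ans r
  | visit {rest : List Int} {cv : Int} {seen : PySem.Set Int} {ans : Int} {r : PySem.Set Int × Int}
      (h : cv ∉ seen) :
      BStep g (rest ++ (pvNbrs g cv).reverse) (PySem.Set.add seen cv) (max ans (cv + 1)) r →
      BStep g (rest ++ [cv]) seen ans r

-- A's recursion, continued by any pending stack, is one run of B's loop
theorem simLoop (g : List (Int × List Int)) (f : Nat)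
    (hA : ∀ (v : Int) (seen : PySem.Set Int) (ans : Int) (s : PySem.Set Int) (a : Int),
      dfsA f v g seen ans = some (s, a) → v ∉ seen →
      ∀ (stack : List Int) (r : PySem.Set Int × Int),
        BStep g stack s a r → BStep g (stack ++ [v]) seen ans r) :
    ∀ (l : List Int) (seen : PySem.Set Int) (ans : Int) (s : PySem.Set Int) (a : Int),
      dfsALoop f l g seen ans = some (s, a) →
      ∀ (stack : List Int) (r : PySem.Set Int × Int),
        BStep g stack s a r → BStep g (stack ++ l.reverse) seen ans r := by
  intro l
  induction l with
  | nil =>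
    intro seen ans s a h stack r hb
    rw [dfsALoop] at h
    simp only [Option.some.injEq, Prod.mk.injEq] at h
    obtain ⟨h1, h2⟩ := h
    subst h1; subst h2
    simpa using hb
  | cons cv rest ih =>
    intro seen ans s a h stack r hb
    rw [dfsALoop] at h
    simp only [List.reverse_cons, ← List.append_assoc]
    by_cases hc : cv ∈ seen
    · rw [if_pos ((PySem.Set.contains_iff seen cv).2 hc)] at h
      exact BStep.skip hc (ih seen ans s a h stack r hb)
    · rw [if_neg (by rw [Bool.not_eq_true]; exact contains_eq_false_of_not_mem hc)] at h
      rcases h1 : dfsA f cv g seen ans with _ | ⟨s1, a1⟩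
      · rw [h1] at h; exact absurd h (by simp)
      · rw [h1] at h
        exact hA cv seen ans s1 a1 h1 hc (stack ++ rest.reverse) r (ih s1 a1 s a h stack r hb)

theorem simA (g : List (Int × List Int)) :
    ∀ (f : Nat) (v : Int) (seen : PySem.Set Int) (ans : Int) (s : PySem.Set Int) (a : Int),
      dfsA f v g seen ans = some (s, a) → v ∉ seen →
      ∀ (stack : List Int) (r : PySem.Set Int × Int),
        BStep g stack s a r → BStep g (stack ++ [v]) seen ans r := by
  intro f
  induction f with
  | zero => intro v seen ans s a h; rw [dfsA] at h; exact absurd h (by simp)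
  | succ f ihf =>
    intro v seen ans s a h hv stack r hb
    rw [dfsA] at h
    exact BStep.visit hv (simLoop g f ihf (pvNbrs g v) _ _ s a h stack r hb)

-- fueled B computes any BStep result (determinism of the loop)
theorem BStep_det_fuel (g : List (Int × List Int)) {st : List Int} {seen : PySem.Set Int} {ans : Int}
    {r : PySem.Set Int × Int} (h : BStep g st seen ans r) :
    ∀ (f : Nat) (r' : PySem.Set Int × Int), dfsBLoop f st g seen ans = some r' → r' = r := by
  induction h with
  | nil seen ans =>
    intro f r' h'
    rw [dfsBLoop_nil] at h'
    simp only [Option.some.injEq] at h'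
    exact h'.symm
  | @skip rest cv seen ans rr hc hb ih =>
    intro f r' h'
    rcases f with _ | f
    · rw [dfsBLoop_zero _ (by simp)] at h'; exact absurd h' (by simp)
    · rw [dfsBLoop_concat, if_pos ((PySem.Set.contains_iff seen cv).2 hc)] at h'
      exact ih f r' h'
  | @visit rest cv seen ans rr hc hb ih =>
    intro f r' h'
    rcases f with _ | f
    · rw [dfsBLoop_zero _ (by simp)] at h'; exact absurd h' (by simp)
    · rw [dfsBLoop_concat, if_neg (by rw [Bool.not_eq_true]; exact contains_eq_false_of_not_mem hc)] at h'
      exact ih f r' h'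

-- ===== VERDICT (by name: the statement is the Claim_ definition above) =====
theorem dfs_spec : Claim_equal_dfs := by
  intro v g seen ans _hdom _hpre
  unfold Spec_dfs dfs dfs_alt
  -- run A to completion
  have hfa : pvFuelA g = ((pvVerts g).length + 1) + 1 := rfl
  obtain ⟨rA, hrA, _⟩ := suffLoop g ((pvVerts g).length + 1) (suffA g _)
    (pvNbrs g v) (fun x hx => mem_pvNbrs g v x hx)
    (PySem.Set.add seen v) (max ans (v + 1))
    (le_trans (pvCnt_le_len g _) (by omega))
  have hA1 : dfsA (pvFuelA g) v g seen ans = some rA := by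
    rw [hfa, dfsA]; exact hrA
  -- run B to completion
  obtain ⟨rB, hrB⟩ := suffB g (pvFuelB g) ((pvNbrs g v).reverse)
    (PySem.Set.add seen v) (max ans (v + 1))
    (fun x hx => mem_pvNbrs g v x (List.mem_reverse.1 hx))
    (by
      have h1 := len_pvNbrs g v
      have h2 := pvCnt_le_len g (PySem.Set.add seen v)
      simp only [List.length_reverse, pvFuelB]
      nlinarith)
  -- A's run is a BStep of B's initial stack, and fueled B follows it
  have hstep : BStep g ((pvNbrs g v).reverse) (PySem.Set.add seen v) (max ans (v + 1)) rA := by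
    have := simLoop g ((pvVerts g).length + 1) (simA g _) (pvNbrs g v)
      (PySem.Set.add seen v) (max ans (v + 1)) rA.1 rA.2 (by rw [← hrA]) [] rA (BStep.nil rA.1 rA.2)
    simpa using this
  have : rB = rA := BStep_det_fuel g hstep (pvFuelB g) rB hrB
  rw [hA1, hrB, this]
  rfl
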